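-- pv_equiv track=rewrite | github.com/joao-eduardo17/python | Listas/CodingBat/list-1.py | first_last6
-- ===== SOURCE A (Python) =====
-- def first_last6(nums):
--     index = 1
--     for c in nums:
--         if c == 6 and index == 1:
--             return True
--         if c == 6 and index == len(nums):
--             return True
--         index += 1
--     return False
-- ===== SOURCE B (Python) =====
-- def first_last6(nums):
--     if not nums:
--         return False
--     return nums[0] == 6 or nums[-1] == 6
-- ===== Notes on version B (the rewrite author's own statement) =====
-- stated objective: simpler
-- what changed: Replaces the positional scan with index counter by a direct check of the first and last elements behind an emptiness guard.
import Mathlib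
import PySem

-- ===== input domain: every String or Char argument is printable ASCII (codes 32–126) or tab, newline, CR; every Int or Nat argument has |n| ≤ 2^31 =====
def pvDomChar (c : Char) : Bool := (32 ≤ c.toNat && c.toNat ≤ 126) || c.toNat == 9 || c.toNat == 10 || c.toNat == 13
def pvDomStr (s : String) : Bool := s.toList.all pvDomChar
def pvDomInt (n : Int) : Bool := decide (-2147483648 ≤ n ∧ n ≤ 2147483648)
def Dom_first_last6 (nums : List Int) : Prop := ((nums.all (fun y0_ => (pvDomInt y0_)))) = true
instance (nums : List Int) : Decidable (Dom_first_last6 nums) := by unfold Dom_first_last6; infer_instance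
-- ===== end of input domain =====

-- B replaces A's scanning loop with a direct first/last-element check (simpler).
-- ===== PORT A =====
def first_last6_loopA : List Int → Int → Int → Bool
  | [], _, _ => false
  | c :: rest, index, n =>
    if c == 6 && index == 1 then true
    else if c == 6 && index == n then true
    else first_last6_loopA rest (index + 1) n

def first_last6 (nums : List Int) : Bool :=
  first_last6_loopA nums 1 (nums.length : Int)

-- ===== PORT B =====
def first_last6_alt (nums : List Int) : Bool :=
  if nums.isEmpty then false
  else (nums.head? == some 6) || (nums.getLast? == some 6)

-- ===== PRECONDITION & SPEC =====
def Spec_first_last6 (nums : List Int) (out : Bool) : Prop := out = first_last6_alt nums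
instance (nums : List Int) (out : Bool) : Decidable (Spec_first_last6 nums out) := by unfold Spec_first_last6; infer_instance

-- ===== CLAIM (what is proved, stated in full; the proofs are below) =====
def Claim_equal_first_last6 : Prop := ∀ (nums : List Int), Dom_first_last6 nums → Spec_first_last6 nums (first_last6 nums)

-- ===== LEMMAS AND PROOFS =====

-- ===== VERDICT (by name: the statement is the Claim_ definition above) =====
theorem first_last6_loopA_tail (rest : List Int) :
    ∀ index n : Int, 2 ≤ index → index + rest.length = n + 1 →
      first_last6_loopA rest index n = (rest.getLast? == some 6) := by
  induction rest with
  | nil => intro index n _ _; simp [first_last6_loopA]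
  | cons c rest ih =>
    intro index n h2 hlen
    simp only [first_last6_loopA]
    have hne1 : (index == 1) = false := by simp; omega
    cases rest with
    | nil =>
      have hn : (index == n) = true := by simp at hlen ⊢; omega
      simp [hne1, hn]
      by_cases hc : c = 6 <;> simp [hc, first_last6_loopA]
    | cons d rest' =>
      have hn : (index == n) = false := by
        simp at hlen ⊢; omega
      have := ih (index + 1) n (by omega) (by simp at hlen ⊢; omega)
      simp [hne1, hn, this]

theorem first_last6_spec : Claim_equal_first_last6 := by
  intro nums _
  unfold Spec_first_last6
  cases nums with
  | nil => rfl
  | cons x xs =>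
    simp only [first_last6, first_last6_alt, first_last6_loopA, List.isEmpty_cons,
      List.head?_cons]
    by_cases hx : x = 6
    · simp [hx]
    · cases xs with
      | nil => simp [hx, first_last6_loopA]
      | cons y ys =>
        have h := first_last6_loopA_tail (y :: ys) 2 ((ys.length : Int) + 1 + 1)
          (by omega) (by simp; omega)
        simp [hx, h]
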